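-- pv_equiv track=rewrite | github.com/raivydas/lithuanian-olympiads | weekends.py | count_weekends
-- ===== SOURCE A (Python) =====
-- def leap_year(year):
--     if year % 400 == 0 or year % 100 != 0 and year % 4 == 0:
--         return True
--     else:
--         return False
--
-- def find_first_day(year):
--     curr_day = 6
--     curr_year = 1978
--     if year == curr_year:
--         return curr_day
--     elif year < curr_year:
--         while year != curr_year:
--             curr_year -= 1
--             if leap_year(curr_year):
--                 curr_day = (curr_day - 366) % 7
--             else:
--                 curr_day = (curr_day - 365) % 7
--         return curr_day
--     else:
--         while year != curr_year:
--             if leap_year(curr_year):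
--                 curr_day = (curr_day + 366) % 7
--             else:
--                 curr_day = (curr_day + 365) % 7
--             curr_year += 1
--         return curr_day
--
-- def count_weekends(year):
--     weekend_days = 0
--     day_of_year = find_first_day(year)
--     if leap_year(year):
--         days_in_year = 366
--     else:
--         days_in_year = 365
--     for curr_day in range(days_in_year):
--         curr_weekday = (day_of_year + curr_day) % 7
--         if curr_weekday == 5 or curr_weekday == 6:
--             weekend_days += 1
--     return weekend_days
-- ===== SOURCE B (Python) =====
-- def count_weekends(year):
--     # closed-form: leaps up to and including year y
--     lp = lambda y: y // 4 - y // 100 + y // 400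
--     leap = year % 4 == 0 and (year % 100 != 0 or year % 400 == 0)
--     # weekday of Jan 1 (A's numbering: 1978-01-01 = 6)
--     w = (6 + 365 * (year - 1978) + lp(year - 1) - lp(1977)) % 7
--     d = 366 if leap else 365
--     # count days i in [0,d) with (w+i)%7 == 5 plus those == 6
--     return (d + 6 - (5 - w) % 7) // 7 + (d + 6 - (6 - w) % 7) // 7
-- ===== Notes on version B (the rewrite author's own statement) =====
-- stated objective: faster
-- what changed: Replaced the year-by-year walk from 1978 and the 365/366-iteration day loop with a closed-form leap-day count (y//4 - y//100 + y//400) giving Jan 1's weekday and arithmetic formulas counting Saturdays and Sundays.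
import Mathlib
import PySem

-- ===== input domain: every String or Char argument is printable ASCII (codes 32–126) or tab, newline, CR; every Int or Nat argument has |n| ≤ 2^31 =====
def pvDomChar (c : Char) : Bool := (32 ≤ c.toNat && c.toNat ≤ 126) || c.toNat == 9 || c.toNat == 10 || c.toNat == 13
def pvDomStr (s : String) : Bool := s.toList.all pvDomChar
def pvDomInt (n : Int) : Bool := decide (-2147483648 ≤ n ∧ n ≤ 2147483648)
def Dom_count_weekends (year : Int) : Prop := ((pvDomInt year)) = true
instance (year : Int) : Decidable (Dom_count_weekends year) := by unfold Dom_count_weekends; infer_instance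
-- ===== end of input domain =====

-- B replaces A's two year-by-year/day-by-day loops with closed-form leap counting and
-- weekday arithmetic (objective: faster, O(1) instead of O(|year-1978|)).

-- ===== PORT A =====
def leap_year (year : Int) : Bool :=
  if PySem.Int.mod year 400 == 0 || (PySem.Int.mod year 100 != 0 && PySem.Int.mod year 4 == 0)
  then true else false

-- backwards while-loop of find_first_day (fuel = number of iterations needed)
def ffdDown (year : Int) : Int → Int → Nat → Int
  | _, cd, 0 => cd
  | cy, cd, Nat.succ n =>
      if year == cy then cd
      else
        let cy' := cy - 1
        let cd' := if leap_year cy' then PySem.Int.mod (cd - 366) 7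
                   else PySem.Int.mod (cd - 365) 7
        ffdDown year cy' cd' n

-- forwards while-loop of find_first_day
def ffdUp (year : Int) : Int → Int → Nat → Int
  | _, cd, 0 => cd
  | cy, cd, Nat.succ n =>
      if year == cy then cd
      else
        let cd' := if leap_year cy then PySem.Int.mod (cd + 366) 7
                   else PySem.Int.mod (cd + 365) 7
        ffdUp year (cy + 1) cd' n

def find_first_day (year : Int) : Int :=
  if year == 1978 then 6
  else if year < 1978 then ffdDown year 1978 6 (1978 - year).toNat
  else ffdUp year 1978 6 (year - 1978).toNat

def count_weekends (year : Int) : Int :=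
  let day_of_year := find_first_day year
  let days_in_year : Int := if leap_year year then 366 else 365
  (PySem.List.pyRange 0 days_in_year 1).foldl
    (fun weekend_days curr_day =>
      let curr_weekday := PySem.Int.mod (day_of_year + curr_day) 7
      if curr_weekday == 5 || curr_weekday == 6 then weekend_days + 1 else weekend_days)
    0

-- ===== PORT B =====
-- leap days up to and including year y
def lpB (y : Int) : Int :=
  PySem.Int.floordiv y 4 - PySem.Int.floordiv y 100 + PySem.Int.floordiv y 400

def count_weekends_alt (year : Int) : Int :=
  let leap := PySem.Int.mod year 4 == 0 &&
              (PySem.Int.mod year 100 != 0 || PySem.Int.mod year 400 == 0)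
  let w := PySem.Int.mod (6 + 365 * (year - 1978) + lpB (year - 1) - lpB 1977) 7
  let d : Int := if leap then 366 else 365
  PySem.Int.floordiv (d + 6 - PySem.Int.mod (5 - w) 7) 7 +
    PySem.Int.floordiv (d + 6 - PySem.Int.mod (6 - w) 7) 7

-- ===== PRECONDITION & SPEC =====
def Spec_count_weekends (year : Int) (out : Int) : Prop := out = count_weekends_alt year
instance (year : Int) (out : Int) : Decidable (Spec_count_weekends year out) := by unfold Spec_count_weekends; infer_instance

-- ===== CLAIM (what is proved, stated in full; the proofs are below) =====
def Claim_equal_count_weekends : Prop := ∀ (year : Int), Dom_count_weekends year → Spec_count_weekends year (count_weekends year)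

-- ===== LEMMAS AND PROOFS =====

-- closed-form weekday of Jan 1 of year y, in A's numbering
def Wday (y : Int) : Int :=
  PySem.Int.mod (6 + 365 * (y - 1978) + lpB (y - 1) - lpB 1977) 7

theorem leap_iff (y : Int) :
    leap_year y = true ↔ (y % 400 = 0 ∨ (¬ y % 100 = 0 ∧ y % 4 = 0)) := by
  unfold leap_year
  simp only [PySem.Int.mod_eq_emod_of_pos (show (0:Int) < 4 by omega),
    PySem.Int.mod_eq_emod_of_pos (show (0:Int) < 100 by omega),
    PySem.Int.mod_eq_emod_of_pos (show (0:Int) < 400 by omega)]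
  by_cases h4 : y % 4 = 0 <;> by_cases h100 : y % 100 = 0 <;> by_cases h400 : y % 400 = 0 <;>
    simp [h4, h100, h400]

theorem lpB_step (y : Int) :
    lpB y - lpB (y - 1) = (if leap_year y then 1 else 0) := by
  have hiff := leap_iff y
  unfold lpB
  simp only [PySem.Int.floordiv_eq_ediv_of_pos (show (0:Int) < 4 by omega),
    PySem.Int.floordiv_eq_ediv_of_pos (show (0:Int) < 100 by omega),
    PySem.Int.floordiv_eq_ediv_of_pos (show (0:Int) < 400 by omega)]
  by_cases hl : leap_year y = true
  · simp only [if_pos hl]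
    have h := hiff.mp hl
    omega
  · simp only [if_neg hl]
    rw [hiff] at hl
    omega

theorem Wday_succ (y : Int) :
    Wday (y + 1) = if leap_year y then PySem.Int.mod (Wday y + 366) 7
                   else PySem.Int.mod (Wday y + 365) 7 := by
  have h := lpB_step y
  unfold Wday
  simp only [PySem.Int.mod_eq_emod_of_pos (show (0:Int) < 7 by omega)]
  have hy : y + 1 - 1 = y := by ring
  rw [hy]
  split_ifs with hl <;> [rw [if_pos hl] at h; rw [if_neg hl] at h] <;> omega

theorem ffdUp_closed (year : Int) : ∀ (n : Nat) (cy : Int), year = cy + n →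
    ffdUp year cy (Wday cy) n = Wday year := by
  intro n
  induction n with
  | zero => intro cy h; simp [ffdUp]; rw [h]; simp
  | succ n ih =>
    intro cy h
    have hne : year ≠ cy := by omega
    rw [ffdUp]
    rw [if_neg (by simpa using hne)]
    have hstep : (if leap_year cy then PySem.Int.mod (Wday cy + 366) 7
                  else PySem.Int.mod (Wday cy + 365) 7) = Wday (cy + 1) :=
      (Wday_succ cy).symm
    simp only [hstep]
    exact ih (cy + 1) (by push_cast at h ⊢; omega)

theorem ffdDown_closed (year : Int) : ∀ (n : Nat) (cy : Int), year = cy - n →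
    ffdDown year cy (Wday cy) n = Wday year := by
  intro n
  induction n with
  | zero => intro cy h; simp [ffdDown]; rw [h]; simp
  | succ n ih =>
    intro cy h
    have hne : year ≠ cy := by omega
    rw [ffdDown]
    rw [if_neg (by simpa using hne)]
    have hstep : (if leap_year (cy - 1) then PySem.Int.mod (Wday cy - 366) 7
                  else PySem.Int.mod (Wday cy - 365) 7) = Wday (cy - 1) := by
      have h2 := Wday_succ (cy - 1)
      have hc : cy - 1 + 1 = cy := by ring
      rw [hc] at h2
      unfold Wday at h2 ⊢
      simp only [PySem.Int.mod_eq_emod_of_pos (show (0:Int) < 7 by omega)] at h2 ⊢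
      split_ifs at h2 ⊢ with hl <;> omega
    simp only [hstep]
    exact ih (cy - 1) (by push_cast at h ⊢; omega)

set_option maxRecDepth 4000 in
theorem Wday_1978 : Wday 1978 = 6 := by decide

theorem find_first_day_eq (year : Int) : find_first_day year = Wday year := by
  unfold find_first_day
  split_ifs with h1 h2
  · have : year = 1978 := by simpa using h1
    rw [this, Wday_1978]
  · rw [← Wday_1978]
    exact ffdDown_closed year (1978 - year).toNat 1978 (by
      have : year < 1978 := h2
      omega)
  · rw [← Wday_1978]
    exact ffdUp_closed year (year - 1978).toNat 1978 (by
      have hle : ¬ year < 1978 := h2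
      omega)

theorem Wday_bounds (y : Int) : 0 ≤ Wday y ∧ Wday y < 7 :=
  ⟨PySem.Int.mod_nonneg _ (by omega), PySem.Int.mod_lt _ (by omega)⟩

theorem leap_eq (y : Int) :
    leap_year y = (PySem.Int.mod y 4 == 0 &&
      (PySem.Int.mod y 100 != 0 || PySem.Int.mod y 400 == 0)) := by
  unfold leap_year
  simp only [PySem.Int.mod_eq_emod_of_pos (show (0:Int) < 4 by omega),
    PySem.Int.mod_eq_emod_of_pos (show (0:Int) < 100 by omega),
    PySem.Int.mod_eq_emod_of_pos (show (0:Int) < 400 by omega)]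
  by_cases h4 : y % 4 = 0 <;> by_cases h100 : y % 100 = 0 <;> by_cases h400 : y % 400 = 0 <;>
    simp [h4, h100, h400] <;> omega

-- the day loop for a fixed first weekday w ∈ [0,7) and length d ∈ {365,366}
set_option maxRecDepth 100000 in
set_option maxHeartbeats 2000000 in
theorem loop_closed (w : Int) (hw0 : 0 ≤ w) (hw7 : w < 7) (d : Int)
    (hd : d = 365 ∨ d = 366) :
    (PySem.List.pyRange 0 d 1).foldl
      (fun weekend_days curr_day =>
        let curr_weekday := PySem.Int.mod (w + curr_day) 7
        if curr_weekday == 5 || curr_weekday == 6 then weekend_days + 1 else weekend_days)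
      0
    = PySem.Int.floordiv (d + 6 - PySem.Int.mod (5 - w) 7) 7 +
        PySem.Int.floordiv (d + 6 - PySem.Int.mod (6 - w) 7) 7 := by
  interval_cases w <;> rcases hd with rfl | rfl <;> decide

-- ===== VERDICT (by name: the statement is the Claim_ definition above) =====
theorem count_weekends_spec : Claim_equal_count_weekends := by
  intro year _
  unfold Spec_count_weekends count_weekends count_weekends_alt
  rw [find_first_day_eq, leap_eq]
  obtain ⟨hb0, hb7⟩ := Wday_bounds year
  exact loop_closed (Wday year) hb0 hb7 _ (by split_ifs <;> simp)
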